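-- pv_equiv track=rewrite | github.com/Ivanettoss/Controller-Free-Drive-Simulator | PedalsOK.py | largest_true_segment
-- ===== SOURCE A (Python) =====
-- def largest_true_segment(flags):
--     best = None
--     start = None
--
--     for i, v in enumerate(flags):
--         if v and start is None:
--             start = i
--         elif not v and start is not None:
--             seg = (start, i - 1)
--             if best is None or seg[1] - seg[0] > best[1] - best[0]:
--                 best = seg
--             start = None
--
--     if start is not None:
--         seg = (start, len(flags) - 1)
--         if best is None or seg[1] - seg[0] > best[1] - best[0]:
--             best = seg
--
--     return best
-- ===== SOURCE B (Python) =====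
-- def _runs(flags):
--     # split into maximal runs as (bool value, length) pairs
--     out = []
--     cur = None
--     count = 0
--     for v in flags:
--         k = bool(v)
--         if cur is None:
--             cur, count = k, 1
--         elif k == cur:
--             count += 1
--         else:
--             out.append((cur, count))
--             cur, count = k, 1
--     if cur is not None:
--         out.append((cur, count))
--     return out
--
--
-- def largest_true_segment(flags):
--     best = None
--     idx = 0
--     for key, length in _runs(flags):
--         if key:
--             seg = (idx, idx + length - 1)
--             if best is None or seg[1] - seg[0] > best[1] - best[0]:
--                 best = seg
--         idx += length
--     return best
-- ===== Notes on version B (the rewrite author's own statement) =====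
-- stated objective: alternative
-- what changed: B first splits flags into maximal (value,length) runs with a hand-rolled groupby pass, then scans the run list keeping the first strictly-longest true run, instead of A's in-loop start/best state machine over indices.
import Mathlib
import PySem

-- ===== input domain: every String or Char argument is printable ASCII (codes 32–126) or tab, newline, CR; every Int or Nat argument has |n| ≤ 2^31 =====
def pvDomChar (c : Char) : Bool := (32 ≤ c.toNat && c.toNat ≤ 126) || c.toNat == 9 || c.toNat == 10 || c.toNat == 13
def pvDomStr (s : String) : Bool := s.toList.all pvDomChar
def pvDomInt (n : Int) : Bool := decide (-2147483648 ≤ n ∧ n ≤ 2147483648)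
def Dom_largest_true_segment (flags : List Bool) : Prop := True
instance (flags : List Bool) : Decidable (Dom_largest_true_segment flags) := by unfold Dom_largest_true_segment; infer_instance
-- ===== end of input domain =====

-- B replaces A's in-loop start/best state machine by a run-splitting pass followed by a
-- scan over the runs (objective: alternative decomposition, same O(n) cost).

-- ===== PORT A =====
-- best-update: `if best is None or seg[1]-seg[0] > best[1]-best[0]: best = seg`
def updA (best : Option (Int × Int)) (seg : Int × Int) : Option (Int × Int) :=
  match best with
  | none => some seg
  | some b => if seg.2 - seg.1 > b.2 - b.1 then some seg else some b

-- the `for i, v in enumerate(flags)` loop, state (best, start), i the enumerate counter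
def aLoop : Option (Int × Int) → Option Int → Nat → List Bool → Option (Int × Int) × Option Int
  | best, start, _, [] => (best, start)
  | best, start, i, v :: rest =>
    if v && start.isNone then
      aLoop best (some (i : Int)) (i + 1) rest
    else if !v && start.isSome then
      aLoop (updA best (start.getD 0, (i : Int) - 1)) none (i + 1) rest
    else
      aLoop best start (i + 1) rest

-- the trailing `if start is not None:` block (n = len(flags))
def finA (st : Option (Int × Int) × Option Int) (n : Nat) : Option (Int × Int) :=
  match st.2 with
  | some s => updA st.1 (s, (n : Int) - 1)
  | none => st.1

def largest_true_segment (flags : List Bool) : Option (Int × Int) :=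
  finA (aLoop none none 0 flags) flags.length

-- ===== PORT B =====
-- _runs: out accumulates finished runs in reverse (Python appends at the back)
def runsLoop : List (Bool × Nat) → Option Bool → Nat → List Bool → List (Bool × Nat)
  | out, none, _, v :: rest => runsLoop out (some v) 1 rest
  | out, some c, count, v :: rest =>
    if v == c then runsLoop out (some c) (count + 1) rest
    else runsLoop ((c, count) :: out) (some v) 1 rest
  | out, cur, count, [] =>
    (match cur with
     | some c => (c, count) :: out
     | none => out).reverse

-- the `for key, length in _runs(flags)` loop, state (best, idx)
def bLoop : Option (Int × Int) → Nat → List (Bool × Nat) → Option (Int × Int)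
  | best, _, [] => best
  | best, idx, (key, len) :: rest =>
    if key then
      let seg : Int × Int := ((idx : Int), (idx : Int) + (len : Int) - 1)
      let best' :=
        match best with
        | none => some seg
        | some b => if seg.2 - seg.1 > b.2 - b.1 then some seg else some b
      bLoop best' (idx + len) rest
    else bLoop best (idx + len) rest

def largest_true_segment_alt (flags : List Bool) : Option (Int × Int) :=
  bLoop none 0 (runsLoop [] none 0 flags)

-- ===== PRECONDITION & SPEC =====
def Spec_largest_true_segment (flags : List Bool) (out : Option (Int × Int)) : Prop := out = largest_true_segment_alt flags
instance (flags : List Bool) (out : Option (Int × Int)) : Decidable (Spec_largest_true_segment flags out) := by unfold Spec_largest_true_segment; infer_instance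

-- ===== CLAIM (what is proved, stated in full; the proofs are below) =====
def Claim_equal_largest_true_segment : Prop := ∀ (flags : List Bool), Dom_largest_true_segment flags → Spec_largest_true_segment flags (largest_true_segment flags)

-- ===== LEMMAS AND PROOFS =====

-- proof-side view of _runs without the accumulator: current run value c, current count n
def runsGo : Bool → Nat → List Bool → List (Bool × Nat)
  | c, n, [] => [(c, n)]
  | c, n, v :: rest => if v == c then runsGo c (n + 1) rest else (c, n) :: runsGo v 1 rest

theorem runsLoop_some_eq (xs : List Bool) : ∀ (out : List (Bool × Nat)) (c : Bool) (n : Nat),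
    runsLoop out (some c) n xs = out.reverse ++ runsGo c n xs := by
  induction xs with
  | nil => intro out c n; simp [runsLoop, runsGo]
  | cons v rest ih =>
    intro out c n
    by_cases h : v = c <;> simp [runsLoop, runsGo, h, ih]

theorem runsLoop_none_nil (xs : List Bool) :
    runsLoop [] none 0 xs = (match xs with | [] => [] | v :: rest => runsGo v 1 rest) := by
  cases xs with
  | nil => simp [runsLoop]
  | cons v rest => simpa using runsLoop_some_eq rest [] v 1

-- core invariant: A's state machine agrees with B's run scan, both mid-run (start = some s,
-- current run length c) and between runs (start = none, pending false-run of length c)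
theorem aLoop_bLoop (xs : List Bool) :
    (∀ (best : Option (Int × Int)) (s c : Nat),
      finA (aLoop best (some (s : Int)) (s + c) xs) (s + c + xs.length)
        = bLoop best s (runsGo true c xs)) ∧
    (∀ (best : Option (Int × Int)) (i c : Nat),
      finA (aLoop best none (i + c) xs) (i + c + xs.length)
        = bLoop best i (runsGo false c xs)) := by
  induction xs with
  | nil =>
    constructor
    · intro best s c
      have h : ((s + c : Nat) : Int) - 1 = (s : Int) + (c : Int) - 1 := by push_cast; ring
      simp [aLoop, finA, runsGo, bLoop, updA]
    · intro best i c
      simp [aLoop, finA, runsGo, bLoop]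
  | cons v rest ih =>
    constructor
    · intro best s c
      cases v with
      | true =>
        have h1 : s + c + 1 = s + (c + 1) := by omega
        have h2 : s + c + (rest.length + 1) = s + (c + 1) + rest.length := by omega
        simp only [aLoop, Option.isNone, Bool.and_false, runsGo, List.length_cons,
          Bool.not_true, Bool.false_and, beq_self_eq_true, if_true]
        rw [h1, h2]
        exact ih.1 best s (c + 1)
      | false =>
        have hseg : ((s + c : Nat) : Int) - 1 = (s : Int) + (c : Int) - 1 := by push_cast; ring
        have h1 : s + c + 1 = (s + c) + 1 := rfl
        have h2 : s + c + (rest.length + 1) = (s + c) + 1 + rest.length := by omega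
        simp only [aLoop, runsGo, List.length_cons, Option.isNone, Option.isSome,
          Bool.false_and, Bool.not_false, Bool.true_and, if_false, if_true,
          beq_iff_eq, Bool.false_eq_true, Option.getD_some]
        rw [hseg, h2]
        cases best with
        | none =>
          simpa [bLoop, updA] using ih.2 (some ((s : Int), (s : Int) + (c : Int) - 1)) (s + c) 1
        | some b =>
          by_cases hb : (s : Int) + (c : Int) - 1 - (s : Int) > b.2 - b.1 <;>
            simp only [bLoop, updA, hb, if_true, if_false] <;>
            [exact ih.2 (some ((s : Int), (s : Int) + (c : Int) - 1)) (s + c) 1;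
             exact ih.2 (some b) (s + c) 1]
    · intro best i c
      cases v with
      | false =>
        have h1 : i + c + 1 = i + (c + 1) := by omega
        have h2 : i + c + (rest.length + 1) = i + (c + 1) + rest.length := by omega
        simp only [aLoop, runsGo, List.length_cons, Option.isNone, Option.isSome,
          Bool.false_and, Bool.not_false, Bool.true_and, if_true, beq_self_eq_true]
        rw [h1, h2]
        exact ih.2 best i (c + 1)
      | true =>
        have h2 : i + c + (rest.length + 1) = (i + c) + 1 + rest.length := by omega
        simp only [aLoop, runsGo, List.length_cons, Option.isNone, Bool.true_and,
          if_true, beq_iff_eq, Bool.true_eq_false, if_false, bLoop]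
        rw [h2]
        exact ih.1 best (i + c) 1

-- ===== VERDICT (by name: the statement is the Claim_ definition above) =====
theorem largest_true_segment_spec : Claim_equal_largest_true_segment := by
  intro flags _
  unfold Spec_largest_true_segment largest_true_segment largest_true_segment_alt
  rw [runsLoop_none_nil]
  cases flags with
  | nil => simp [aLoop, finA, bLoop]
  | cons v rest =>
    cases v with
    | true =>
      simpa [aLoop, Nat.add_comm] using (aLoop_bLoop rest).1 none 0 1
    | false =>
      simpa [aLoop, Nat.add_comm] using (aLoop_bLoop rest).2 none 0 1
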